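-- pv_equiv track=rewrite | github.com/SlavaSlavyan/UTTT | tests/main test.py | check_big_selected_cell
-- ===== SOURCE A (Python) =====
-- def check_big_selected_cell(x,y,last):
--
--     selected_cell = 0
--
--     for n in range(3):
--         for i in range(3):
--             if x > -300+200*i and x < -100+200*i and y > 100-200*n and y < 300-200*n:
--                 selected_cell = i+3*n
--                 return selected_cell
--
--     return last
-- ===== SOURCE B (Python) =====
-- def check_big_selected_cell(x, y, last):
--     dx = x + 300
--     dy = 300 - y
--     if 0 <= dx < 600 and 0 <= dy < 600 and dx % 200 != 0 and dy % 200 != 0: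
--         return dx // 200 + 3 * (dy // 200)
--     return last
-- ===== Notes on version B (the rewrite author's own statement) =====
-- stated objective: simpler
-- what changed: Replaced the 3x3 nested scan over candidate cells by direct arithmetic: floor-divide the shifted coordinates by the cell size, with a single range/boundary guard.
import Mathlib
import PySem

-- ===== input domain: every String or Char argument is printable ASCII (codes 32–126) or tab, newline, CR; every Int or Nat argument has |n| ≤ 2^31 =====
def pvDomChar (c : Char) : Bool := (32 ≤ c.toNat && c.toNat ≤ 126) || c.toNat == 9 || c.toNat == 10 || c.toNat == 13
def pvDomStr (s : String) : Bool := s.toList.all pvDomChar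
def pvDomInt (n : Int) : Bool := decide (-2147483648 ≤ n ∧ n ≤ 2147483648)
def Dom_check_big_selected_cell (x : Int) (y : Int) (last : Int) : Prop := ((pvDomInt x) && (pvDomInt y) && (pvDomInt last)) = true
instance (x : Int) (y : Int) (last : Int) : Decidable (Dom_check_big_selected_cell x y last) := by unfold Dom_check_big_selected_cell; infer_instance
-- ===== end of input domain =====

-- ===== PORT A =====
-- B replaces A's 3x3 scan by direct floor-division arithmetic with one boundary guard (objective: simpler).
def pvInnerA (x : Int) (y : Int) (n : Int) : List Int → Option Int
  | [] => none
  | i :: rest =>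
      if -300 + 200 * i < x ∧ x < -100 + 200 * i ∧ 100 - 200 * n < y ∧ y < 300 - 200 * n then
        some (i + 3 * n)
      else pvInnerA x y n rest

def pvOuterA (x : Int) (y : Int) : List Int → Option Int
  | [] => none
  | n :: rest =>
      match pvInnerA x y n (PySem.List.pyRange 0 3 1) with
      | some v => some v
      | none => pvOuterA x y rest

def check_big_selected_cell (x : Int) (y : Int) (last : Int) : Int :=
  (pvOuterA x y (PySem.List.pyRange 0 3 1)).getD last

-- ===== PORT B =====
def check_big_selected_cell_alt (x : Int) (y : Int) (last : Int) : Int :=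
  let dx := x + 300
  let dy := 300 - y
  if 0 ≤ dx ∧ dx < 600 ∧ 0 ≤ dy ∧ dy < 600 ∧
     PySem.Int.mod dx 200 ≠ 0 ∧ PySem.Int.mod dy 200 ≠ 0 then
    PySem.Int.floordiv dx 200 + 3 * PySem.Int.floordiv dy 200
  else last

-- ===== PRECONDITION & SPEC =====
def Spec_check_big_selected_cell (x : Int) (y : Int) (last : Int) (out : Int) : Prop := out = check_big_selected_cell_alt x y last
instance (x : Int) (y : Int) (last : Int) (out : Int) : Decidable (Spec_check_big_selected_cell x y last out) := by unfold Spec_check_big_selected_cell; infer_instance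

-- ===== CLAIM (what is proved, stated in full; the proofs are below) =====
def Claim_equal_check_big_selected_cell : Prop := ∀ (x : Int) (y : Int) (last : Int), Dom_check_big_selected_cell x y last → Spec_check_big_selected_cell x y last (check_big_selected_cell x y last)

-- ===== LEMMAS AND PROOFS =====

-- ===== VERDICT (by name: the statement is the Claim_ definition above) =====
lemma pvInnerA_012 (x y n : Int) :
    pvInnerA x y n [0, 1, 2] =
      if -300 < x ∧ x < 300 ∧ ¬ (200 ∣ (x + 300)) ∧ 100 - 200 * n < y ∧ y < 300 - 200 * n then
        some ((x + 300) / 200 + 3 * n)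
      else none := by
  simp only [pvInnerA]
  split_ifs <;>
    first
      | rfl
      | (simp only [Option.some.injEq]; omega)
      | (exfalso; omega)

theorem check_big_selected_cell_spec : Claim_equal_check_big_selected_cell := by
  intro x y last _
  unfold Spec_check_big_selected_cell check_big_selected_cell check_big_selected_cell_alt
  have hr : PySem.List.pyRange 0 3 1 = [0, 1, 2] := by decide
  simp only [hr, pvOuterA, pvInnerA_012]
  rw [PySem.Int.floordiv_eq_ediv_of_pos (a := x + 300) (by norm_num),
      PySem.Int.floordiv_eq_ediv_of_pos (a := 300 - y) (by norm_num),
      PySem.Int.mod_eq_emod_of_pos (a := x + 300) (by norm_num),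
      PySem.Int.mod_eq_emod_of_pos (a := 300 - y) (by norm_num)]
  split_ifs <;> simp only [Option.getD_some, Option.getD_none] <;> omega
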